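-- pv_equiv track=rewrite | github.com/Pyomo/pyomo | pyomo/solvers/plugins/solvers/multi.py | num_one_occurrences
-- ===== SOURCE A (Python) =====
-- def num_one_occurrences(lst):
--     dist = {}
--     for x in lst:
--         if x in dist:
--             dist[x] += 1
--         else:
--             dist[x] = 1
--     one_offs = [x for x in dist if dist[x] == 1]
--     return len(one_offs)
-- ===== SOURCE B (Python) =====
-- def num_one_occurrences(lst):
--     once = set()
--     seen_more = set()
--     for x in lst:
--         if x in seen_more:
--             pass
--         elif x in once:
--             once.discard(x)
--             seen_more.add(x)
--         else:
--             once.add(x)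
--     return len(once)
-- ===== Notes on version B (the rewrite author's own statement) =====
-- stated objective: alternative
-- what changed: Replaces the frequency dictionary plus final filtering comprehension with a single pass maintaining two sets, 'once' and 'seen_more': the set of singletons is kept directly and the answer is its size.
import Mathlib
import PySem

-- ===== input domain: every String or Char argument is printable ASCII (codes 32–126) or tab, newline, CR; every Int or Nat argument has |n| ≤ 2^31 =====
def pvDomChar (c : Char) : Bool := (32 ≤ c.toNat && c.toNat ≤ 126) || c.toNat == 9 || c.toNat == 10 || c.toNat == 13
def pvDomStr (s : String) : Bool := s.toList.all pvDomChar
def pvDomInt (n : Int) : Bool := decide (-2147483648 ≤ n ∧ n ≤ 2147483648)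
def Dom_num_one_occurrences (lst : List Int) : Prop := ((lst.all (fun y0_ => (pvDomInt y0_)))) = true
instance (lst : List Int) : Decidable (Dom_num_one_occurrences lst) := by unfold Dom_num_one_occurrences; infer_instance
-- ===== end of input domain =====

-- B replaces A's frequency dict + final filter with one pass over two sets (once / seen_more); same cost, different structure.

-- ===== PORT A =====
-- the loop body: if x in dist: dist[x] += 1 else: dist[x] = 1
def pvAStep (d : PySem.Dict Int Int) (x : Int) : PySem.Dict Int Int :=
  if d.contains x then d.insert x (d.getD x 0 + 1) else d.insert x 1

def num_one_occurrences (lst : List Int) : Int :=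
  let dist := lst.foldl pvAStep PySem.Dict.empty
  let one_offs := dist.keys.filter (fun x => dist.getD x 0 == 1)
  (one_offs.length : Int)

-- ===== PORT B =====
-- the loop body: if x in seen_more: pass; elif x in once: move x; else: add x to once
def pvBStep (st : PySem.Set Int × PySem.Set Int) (x : Int) : PySem.Set Int × PySem.Set Int :=
  if PySem.Set.contains st.2 x then st
  else if PySem.Set.contains st.1 x then (PySem.Set.discard st.1 x, PySem.Set.add st.2 x)
  else (PySem.Set.add st.1 x, st.2)

def num_one_occurrences_alt (lst : List Int) : Int :=
  let st := lst.foldl pvBStep (PySem.Set.empty, PySem.Set.empty)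
  (PySem.Set.len st.1 : Int)

-- ===== PRECONDITION & SPEC =====
def Spec_num_one_occurrences (lst : List Int) (out : Int) : Prop := out = num_one_occurrences_alt lst
instance (lst : List Int) (out : Int) : Decidable (Spec_num_one_occurrences lst out) := by unfold Spec_num_one_occurrences; infer_instance

-- ===== CLAIM (what is proved, stated in full; the proofs are below) =====
def Claim_equal_num_one_occurrences : Prop := ∀ (lst : List Int), Dom_num_one_occurrences lst → Spec_num_one_occurrences lst (num_one_occurrences lst)

-- ===== LEMMAS AND PROOFS =====

-- the loop invariant, carried through both folds simultaneously
lemma pv_inv_main (l : List Int) : ∀ (d : PySem.Dict Int Int) (once more : PySem.Set Int),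
    d.keys.Nodup → once.Nodup →
    (∀ y, y ∈ once ↔ d.getD y 0 = 1) →
    (∀ y, y ∈ more ↔ 2 ≤ d.getD y 0) →
    (∀ y, d.contains y = true ↔ 1 ≤ d.getD y 0) →
    ((l.foldl pvAStep d).keys.filter (fun x => (l.foldl pvAStep d).getD x 0 == 1)).length
      = (l.foldl pvBStep (once, more)).1.length := by
  induction l with
  | nil =>
    intro d once more hnd hno h1 h2 hc
    simp only [List.foldl_nil]
    have hperm : (d.keys.filter (fun x => d.getD x 0 == 1)).Perm once := by
      refine (List.perm_ext_iff_of_nodup (hnd.filter _) hno).mpr ?_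
      intro y
      rw [List.mem_filter, h1 y]
      constructor
      · rintro ⟨_, hy⟩; simpa using hy
      · intro hy
        refine ⟨?_, by simpa using hy⟩
        have : d.contains y = true := (hc y).mpr (by omega)
        exact (PySem.Dict.contains_iff_mem_keys _ _).mp this
    exact hperm.length_eq
  | cons x rest ih =>
    intro d once more hnd hno h1 h2 hc
    simp only [List.foldl_cons]
    by_cases hm : 2 ≤ d.getD x 0
    · -- x already seen twice: A bumps the count, B does nothing
      have hcx : d.contains x = true := (hc x).mpr (by omega)
      have hA : pvAStep d x = d.insert x (d.getD x 0 + 1) := by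
        simp [pvAStep, hcx]
      have hB : pvBStep (once, more) x = (once, more) := by
        have hmem : x ∈ more := (h2 x).mpr hm
        simp [pvBStep, hmem]
      rw [hA, hB]
      refine ih _ once more (PySem.Dict.nodup_keys_insert _ _ _ hnd) hno ?_ ?_ ?_
      · intro y; rw [h1 y, PySem.Dict.getD_insert]
        by_cases hyx : y = x
        · subst hyx; simp; omega
        · simp [hyx]
      · intro y; rw [h2 y, PySem.Dict.getD_insert]
        by_cases hyx : y = x
        · subst hyx; simp; omega
        · simp [hyx]
      · intro y; rw [PySem.Dict.getD_insert, PySem.Dict.contains_insert]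
        by_cases hyx : y = x
        · subst hyx; simp; omega
        · simp [hyx, hc y, show (y == x) = false by simp [hyx]]
    · by_cases ho : d.getD x 0 = 1
      · -- x seen exactly once so far: A bumps it to 2, B moves x from once to seen_more
        have hcx : d.contains x = true := (hc x).mpr (by omega)
        have hA : pvAStep d x = d.insert x (d.getD x 0 + 1) := by
          simp [pvAStep, hcx]
        have hB : pvBStep (once, more) x
            = (PySem.Set.discard once x, PySem.Set.add more x) := by
          have hm2 : x ∉ more := fun h => hm ((h2 x).mp h)
          have ho2 : x ∈ once := (h1 x).mpr ho
          simp [pvBStep, hm2, ho2]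
        rw [hA, hB]
        refine ih _ _ _ (PySem.Dict.nodup_keys_insert _ _ _ hnd) (PySem.Set.nodup_discard _ _ hno) ?_ ?_ ?_
        · intro y; rw [PySem.Set.mem_discard, h1 y, PySem.Dict.getD_insert]
          by_cases hyx : y = x
          · subst hyx; simp; omega
          · simp [hyx]
        · intro y; rw [PySem.Set.mem_add, h2 y, PySem.Dict.getD_insert]
          by_cases hyx : y = x
          · subst hyx; simp; omega
          · simp [hyx]
        · intro y; rw [PySem.Dict.getD_insert, PySem.Dict.contains_insert]
          by_cases hyx : y = x
          · subst hyx; simp; omega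
          · simp [hyx, hc y, show (y == x) = false by simp [hyx]]
      · -- x unseen: A starts its count at 1, B adds it to once
        have hcx : d.contains x = false := by
          rw [← Bool.not_eq_true]; intro h
          have := (hc x).mp h; omega
        have hA : pvAStep d x = d.insert x 1 := by
          simp [pvAStep, hcx]
        have hB : pvBStep (once, more) x = (PySem.Set.add once x, more) := by
          have hm2 : x ∉ more := fun h => hm ((h2 x).mp h)
          have ho2 : x ∉ once := fun h => ho ((h1 x).mp h)
          simp [pvBStep, hm2, ho2]
        rw [hA, hB]
        refine ih _ _ _ (PySem.Dict.nodup_keys_insert _ _ _ hnd) (PySem.Set.nodup_add _ _ hno) ?_ ?_ ?_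
        · intro y; rw [PySem.Set.mem_add, h1 y, PySem.Dict.getD_insert]
          by_cases hyx : y = x
          · subst hyx; simp
          · simp [hyx]
        · intro y; rw [h2 y, PySem.Dict.getD_insert]
          by_cases hyx : y = x
          · subst hyx; simp; omega
          · simp [hyx]
        · intro y; rw [PySem.Dict.getD_insert, PySem.Dict.contains_insert]
          by_cases hyx : y = x
          · subst hyx; simp
          · simp [hyx, hc y, show (y == x) = false by simp [hyx]]

-- ===== VERDICT (by name: the statement is the Claim_ definition above) =====
theorem num_one_occurrences_spec : Claim_equal_num_one_occurrences := by
  intro lst _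
  unfold Spec_num_one_occurrences num_one_occurrences num_one_occurrences_alt
  have := pv_inv_main lst PySem.Dict.empty PySem.Set.empty PySem.Set.empty
    (by simp [pysem]) (by simp [PySem.Set.empty])
    (by intro y; simp [PySem.Set.empty, pysem])
    (by intro y; simp [PySem.Set.empty, pysem])
    (by intro y; simp [pysem])
  simp only [PySem.Set.len]
  exact_mod_cast this
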